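-- pv_equiv track=rewrite | github.com/LuizRM/CEciruito | trab1.py | conta_nos
-- ===== SOURCE A (Python) =====
-- NO_INICIAL = 1
--
-- NO_FINAL = 2
--
-- def conta_nos(lista):
--     numero_nos = 0
--     nos = {'0': 0}  # cria um dicionário já com o nó 0
--     for i in range(len(lista)):
--         if(lista[i][NO_INICIAL] not in nos):
--             numero_nos += 1
--             nos[lista[i][NO_INICIAL]] = numero_nos
--         if(lista[i][NO_FINAL] not in nos):
--             numero_nos += 1
--             nos[lista[i][NO_FINAL]] = numero_nos
--     return numero_nos, nos
-- ===== SOURCE B (Python) =====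
-- def conta_nos(lista):
--     flat = ['0']
--     for aresta in lista:
--         flat.append(aresta[1])
--         flat.append(aresta[2])
--     first = {}
--     for pos in range(len(flat) - 1, -1, -1):
--         first[flat[pos]] = pos  # backwards, so the surviving value is the FIRST occurrence
--     uniq = sorted(first, key=first.get)
--     nos = {no: i for i, no in enumerate(uniq)}
--     return len(uniq) - 1, nos
-- ===== Notes on version B (the rewrite author's own statement) =====
-- stated objective: alternative
-- what changed: Replaces A's fused check-insert-count dict loop with a rank-by-position algorithm: flatten all endpoints, record each label's first-occurrence position by one backward overwrite pass, sort the labels by that position, and enumerate the sorted list to build the index map.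
import Mathlib
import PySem

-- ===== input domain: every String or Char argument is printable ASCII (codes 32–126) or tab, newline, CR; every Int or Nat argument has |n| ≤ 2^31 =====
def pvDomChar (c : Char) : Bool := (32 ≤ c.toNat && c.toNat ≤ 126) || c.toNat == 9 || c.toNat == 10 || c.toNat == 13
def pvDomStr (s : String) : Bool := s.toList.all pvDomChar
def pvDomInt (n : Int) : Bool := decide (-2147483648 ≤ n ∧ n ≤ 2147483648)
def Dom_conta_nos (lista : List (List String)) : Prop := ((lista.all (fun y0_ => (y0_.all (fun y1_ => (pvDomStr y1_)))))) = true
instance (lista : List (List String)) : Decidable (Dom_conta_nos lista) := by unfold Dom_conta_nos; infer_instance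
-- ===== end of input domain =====

-- B assigns indices by a different algorithm: record first-occurrence positions backwards, sort labels by them; same value.

-- ===== PORT A =====
-- one conditional insert of A's loop body: if s not in nos, bump the counter and append
def contaStep (st : Int × PySem.Dict String Int) (s : String) : Int × PySem.Dict String Int :=
  if st.2.contains s then st else (st.1 + 1, st.2.insert s (st.1 + 1))

def conta_nos (lista : List (List String)) : Int × (List (String × Int)) :=
  let r := lista.foldl (fun st e =>
    contaStep (contaStep st (PySem.List.pyGetD e 1 "")) (PySem.List.pyGetD e 2 ""))
    (0, PySem.Dict.ofList [("0", 0)])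
  (r.1, r.2.items)

-- ===== PORT B =====
def conta_nos_alt (lista : List (List String)) : Int × (List (String × Int)) :=
  let flat := lista.foldl (fun acc e => acc ++ [PySem.List.pyGetD e 1 "", PySem.List.pyGetD e 2 ""]) ["0"]
  let first := (PySem.List.pyRange (PySem.List.len flat - 1) (-1) (-1)).foldl
      (fun d pos => d.insert (PySem.List.pyGetD flat pos "") pos) PySem.Dict.empty
  -- sorted(first, key=first.get): every sort key is a present dict key, so first.get = getD _ 0 there (exact)
  let uniq := PySem.List.sorted first.keys (fun no => first.getD no 0) false
  let nos := (PySem.List.enumerate uniq 0).foldl (fun d p => d.insert p.2 p.1) PySem.Dict.empty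
  (PySem.List.len uniq - 1, nos.items)

-- ===== PRECONDITION & SPEC =====
-- A raises IndexError when some edge has fewer than 3 entries (it reads edge[1] and edge[2]); Pre_ excludes exactly those.
def Pre_conta_nos (lista : List (List String)) : Prop := ∀ e ∈ lista, 3 ≤ e.length
instance (lista : List (List String)) : Decidable (Pre_conta_nos lista) := by unfold Pre_conta_nos; infer_instance
def pvWitness_conta_nos : List (List String) := [["e1", "a", "b"], ["e2", "b", "0"]]

def Spec_conta_nos (lista : List (List String)) (out : Int × (List (String × Int))) : Prop := out = conta_nos_alt lista
instance (lista : List (List String)) (out : Int × (List (String × Int))) : Decidable (Spec_conta_nos lista out) := by unfold Spec_conta_nos; infer_instance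

-- ===== CLAIM (what is proved, stated in full; the proofs are below) =====
def Claim_equal_conta_nos : Prop := ∀ (lista : List (List String)), Dom_conta_nos lista → Pre_conta_nos lista → Spec_conta_nos lista (conta_nos lista)

-- ===== LEMMAS AND PROOFS =====

-- the dict A maintains, expressed from the list of distinct nodes seen so far
def dictOf (u : List String) : PySem.Dict String Int :=
  PySem.Dict.mk ((PySem.List.enumerate u 0).map (fun p => (p.2, p.1)))

theorem keys_dictOf (u : List String) : (dictOf u).keys = u := by
  simp [dictOf, PySem.Dict.keys, List.map_map]
  exact PySem.List.map_snd_enumerate u 0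

theorem contains_dictOf (u : List String) (s : String) :
    (dictOf u).contains s = decide (s ∈ u) := by
  rw [PySem.Dict.contains_eq_decide_mem_keys, keys_dictOf]

theorem dictOf_append (u : List String) (s : String) (hs : s ∉ u) :
    (dictOf u).insert s (u.length : Int) = dictOf (u ++ [s]) := by
  apply PySem.Dict.ext
  rw [PySem.Dict.items_insert_of_not_contains (h := by simp [contains_dictOf, hs])]
  simp [dictOf, PySem.List.enumerate_append]

theorem conta_invariant (ys : List String) :
    ∀ (u : List String), u.Nodup →
      ys.foldl contaStep ((u.length : Int) - 1, dictOf u)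
        = (((PySem.Set.update u ys).length : Int) - 1, dictOf (PySem.Set.update u ys)) := by
  induction ys with
  | nil => intro u _; simp [PySem.Set.update]
  | cons s ys ih =>
    intro u hu
    rw [List.foldl_cons, PySem.Set.update_cons]
    by_cases hs : s ∈ u
    · rw [PySem.Set.add_of_mem hs]
      have : contaStep ((u.length : Int) - 1, dictOf u) s = ((u.length : Int) - 1, dictOf u) := by
        simp [contaStep, contains_dictOf, hs]
      rw [this]; exact ih u hu
    · rw [PySem.Set.add_of_not_mem hs]
      have : contaStep ((u.length : Int) - 1, dictOf u) s
          = (((u ++ [s]).length : Int) - 1, dictOf (u ++ [s])) := by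
        simp only [contaStep, contains_dictOf, hs, decide_false, Bool.false_eq_true, if_false]
        rw [← dictOf_append u s hs]
        have hl : ((u ++ [s]).length : Int) - 1 = (u.length : Int) := by
          push_cast [List.length_append]; simp
        rw [hl]
        have hv : (u.length : Int) - 1 + 1 = (u.length : Int) := by ring
        rw [hv]
      rw [this]
      exact ih (u ++ [s]) (by simp only [List.nodup_append]; exact ⟨hu, by simp, by intro a ha b hb; simp at hb; subst hb; intro h; exact hs (h ▸ ha)⟩)

-- B's dict comprehension over the deduplicated list has exactly dictOf's items
theorem nos_alt_items (uniq : List String) (hnd : uniq.Nodup) :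
    ((PySem.List.enumerate uniq 0).foldl (fun d p => d.insert p.2 p.1) PySem.Dict.empty).items
      = (PySem.List.enumerate uniq 0).map (fun p => (p.2, p.1)) := by
  have h := PySem.Dict.items_foldl_insert_fresh (l := PySem.List.enumerate uniq 0)
    (k := fun p => p.2) (v := fun p => p.1) (d := PySem.Dict.empty)
    (by intro a _; simp [PySem.Dict.contains_empty])
    (by rw [PySem.List.map_snd_enumerate]; exact hnd)
  simpa [PySem.Dict.items] using h

-- first index of n in xs, counting from offset i (spec of B's backward pass)
def fidx (xs : List String) (n : String) (i : Int) : Option Int :=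
  match xs with
  | [] => none
  | x :: xs => if x = n then some i else fidx xs n (i + 1)

theorem fidx_bounds (xs : List String) (n : String) (i j : Int)
    (h : fidx xs n i = some j) : i ≤ j ∧ j < i + xs.length := by
  induction xs generalizing i with
  | nil => simp [fidx] at h
  | cons x xs ih =>
    simp only [fidx] at h
    split_ifs at h with hx
    · cases h; push_cast [List.length_cons]; omega
    · have := ih (i + 1) h; push_cast [List.length_cons]; omega

theorem fidx_isSome_iff (xs : List String) (n : String) (i : Int) :
    (fidx xs n i).isSome = true ↔ n ∈ xs := by
  induction xs generalizing i with
  | nil => simp [fidx]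
  | cons x xs ih =>
    simp only [fidx]
    split_ifs with hx
    · simp [hx]
    · simp [ih, Ne.symm hx]

theorem fidx_append (ys : List String) (y : String) (n : String) (i : Int) :
    fidx (ys ++ [y]) n i
      = ((fidx ys n i).or (if y = n then some (i + ys.length) else none)) := by
  induction ys generalizing i with
  | nil => simp [fidx]
  | cons x xs ih =>
    by_cases hx : x = n
    · simp [fidx, hx]
    · simp only [List.cons_append, fidx, hx, if_false]
      rw [ih]
      have h1 : i + 1 + (xs.length : Int) = i + ((x :: xs).length : Int) := by
        push_cast [List.length_cons]; ring
      rw [h1]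

-- the backward position pass: its get? at n is the first index of n in xs, else the initial dict's
theorem revFold_get? (xs : List String) (d0 : PySem.Dict String Int) (n : String) :
    ((PySem.List.pyRange ((xs.length : Int) - 1) (-1) (-1)).foldl
        (fun d pos => d.insert (PySem.List.pyGetD xs pos "") pos) d0).get? n
      = (fidx xs n 0).or (d0.get? n) := by
  induction xs using List.reverseRecOn generalizing d0 with
  | nil => simp [PySem.List.pyRange_neg_one_eq_nil, fidx]
  | append_singleton ys y ih =>
    have hlen : (((ys ++ [y]).length : Int) - 1) = (ys.length : Int) := by
      push_cast [List.length_append, List.length_cons, List.length_nil]; ring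
    rw [hlen, PySem.List.pyRange_neg_one_cons (by omega)]
    simp only [List.foldl_cons]
    have hy : PySem.List.pyGetD (ys ++ [y]) ((ys.length : Int)) "" = y := by
      rw [PySem.List.pyGetD_eq_getElem _ _ (by omega) (by simp)]
      simp
    rw [hy]
    rw [PySem.List.foldl_congr_mem _ _ (fun d pos => d.insert (PySem.List.pyGetD ys pos "") pos) _
      (by
        intro acc pos hpos
        rw [PySem.List.mem_pyRange_neg_one] at hpos
        have h1 : pos < ((ys ++ [y]).length : Int) := by
          push_cast [List.length_append, List.length_cons, List.length_nil]; omega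
        have h2 : pos < (ys.length : Int) := by omega
        have hg : PySem.List.pyGetD (ys ++ [y]) pos "" = PySem.List.pyGetD ys pos "" := by
          rw [PySem.List.pyGetD_eq_getElem _ _ (by omega) h1,
              PySem.List.pyGetD_eq_getElem _ _ (by omega) h2,
              List.getElem_append_left]
        simp only [hg])]
    rw [ih, fidx_append, Option.or_assoc]
    congr 1
    rw [PySem.Dict.get?_insert]
    by_cases hyn : y = n
    · simp [hyn]
    · simp [hyn, Ne.symm hyn]

-- keys of the backward pass are the distinct elements of xs (as a reversed-order dedup)
theorem revFold_keys (xs : List String) :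
    ((PySem.List.pyRange ((xs.length : Int) - 1) (-1) (-1)).foldl
        (fun d pos => d.insert (PySem.List.pyGetD xs pos "") pos) PySem.Dict.empty).keys
      = PySem.Set.ofList xs.reverse := by
  rw [PySem.Dict.keys_foldl_insert_key]
  have hmap : (PySem.List.pyRange ((xs.length : Int) - 1) (-1) (-1)).map
      (fun pos => PySem.List.pyGetD xs pos "") = xs.reverse := by
    rw [PySem.List.pyRange_neg_one_eq_reverse]
    have h1 : ((-1 : Int) + 1) = 0 := by ring
    have h2 : ((xs.length : Int) - 1 + 1) = (xs.length : Int) := by ring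
    rw [h1, h2, List.map_reverse, PySem.List.map_pyGetD_pyRange_zero']
  rw [hmap]
  rw [PySem.Set.ofList_eq_foldl]
  rfl

-- dedup is in strictly increasing first-occurrence order
theorem dedup_pairwise_fidx (xs : List String) :
    (PySem.List.dedup xs).Pairwise (fun a b => (fidx xs a 0).getD 0 < (fidx xs b 0).getD 0) := by
  induction xs using List.reverseRecOn with
  | nil => simp [PySem.List.dedup]
  | append_singleton ys y ih =>
    have hded : PySem.List.dedup (ys ++ [y]) = PySem.Set.add (PySem.List.dedup ys) y := by
      simp only [PySem.List.dedup_eq_ofList, PySem.Set.ofList_eq_foldl, List.foldl_append,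
        List.foldl_cons, List.foldl_nil]
    have hkeep : ∀ a ∈ PySem.List.dedup ys, fidx (ys ++ [y]) a 0 = fidx ys a 0 := by
      intro a ha
      have hmem : a ∈ ys := (PySem.List.mem_dedup ys a).mp ha
      have hsome : (fidx ys a 0).isSome = true := (fidx_isSome_iff ys a 0).mpr hmem
      rw [fidx_append]
      cases hfa : fidx ys a 0 with
      | none => rw [hfa] at hsome; simp at hsome
      | some j => rfl
    by_cases hy : y ∈ PySem.List.dedup ys
    · rw [hded, PySem.Set.add_of_mem hy]
      refine ih.imp_of_mem ?_
      intro a b ha hb hab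
      rw [hkeep a ha, hkeep b hb]
      exact hab
    · rw [hded, PySem.Set.add_of_not_mem hy]
      rw [List.pairwise_append]
      refine ⟨ih.imp_of_mem (fun {a b} ha hb hab => by rw [hkeep a ha, hkeep b hb]; exact hab),
        List.pairwise_singleton _ _, ?_⟩
      intro a ha b hb
      rw [List.mem_singleton] at hb; subst b
      have hmem : a ∈ ys := (PySem.List.mem_dedup ys a).mp ha
      have hyn : y ∉ ys := fun h => hy ((PySem.List.mem_dedup ys y).mpr h)
      have hynone : fidx ys y 0 = none := by
        cases hfy : fidx ys y 0 with
        | none => rfl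
        | some j =>
          have : (fidx ys y 0).isSome = true := by rw [hfy]; rfl
          exact absurd ((fidx_isSome_iff ys y 0).mp this) hyn
      have hfy : fidx (ys ++ [y]) y 0 = some ((ys.length : Int)) := by
        rw [fidx_append, hynone]; simp
      rw [hkeep a ha, hfy]
      cases hfa : fidx ys a 0 with
      | none =>
        have : (fidx ys a 0).isSome = true := (fidx_isSome_iff ys a 0).mpr hmem
        rw [hfa] at this; simp at this
      | some j =>
        have hb := fidx_bounds ys a 0 j hfa
        simpa using by omega

theorem sorted_keys_eq_dedup (xs : List String) :
    PySem.List.sorted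
      ((PySem.List.pyRange ((xs.length : Int) - 1) (-1) (-1)).foldl
        (fun d pos => d.insert (PySem.List.pyGetD xs pos "") pos) PySem.Dict.empty).keys
      (fun no => ((PySem.List.pyRange ((xs.length : Int) - 1) (-1) (-1)).foldl
        (fun d pos => d.insert (PySem.List.pyGetD xs pos "") pos) PySem.Dict.empty).getD no 0)
      false
      = PySem.List.dedup xs := by
  have hget : ∀ no, ((PySem.List.pyRange ((xs.length : Int) - 1) (-1) (-1)).foldl
      (fun d pos => d.insert (PySem.List.pyGetD xs pos "") pos) PySem.Dict.empty).getD no 0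
      = (fidx xs no 0).getD 0 := by
    intro no
    rw [PySem.Dict.getD_eq_get?_getD, revFold_get?, PySem.Dict.get?_empty]
    cases fidx xs no 0 <;> rfl
  apply PySem.List.sorted_eq_of_perm_of_pairwise_lt
  · rw [revFold_keys]
    rw [List.perm_ext_iff_of_nodup (PySem.List.nodup_dedup xs) (PySem.Set.nodup_ofList _)]
    intro a
    rw [PySem.List.mem_dedup, PySem.Set.mem_ofList, List.mem_reverse]
  · refine (dedup_pairwise_fidx xs).imp_of_mem ?_
    intro a b _ _ hab
    rw [hget a, hget b]
    exact hab

-- A's double step per edge is the single step over the two endpoints, flattened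
theorem foldl_pairs (lista : List (List String)) (st : Int × PySem.Dict String Int) :
    lista.foldl (fun st e =>
        contaStep (contaStep st (PySem.List.pyGetD e 1 "")) (PySem.List.pyGetD e 2 "")) st
      = (lista.flatMap (fun e => [PySem.List.pyGetD e 1 "", PySem.List.pyGetD e 2 ""])).foldl contaStep st := by
  induction lista generalizing st with
  | nil => rfl
  | cons e l ih => simp [List.foldl_cons, ih]

-- ===== VERDICT (by name: the statement is the Claim_ definition above) =====
theorem conta_nos_spec : Claim_equal_conta_nos := by
  intro lista _ _
  unfold Spec_conta_nos conta_nos conta_nos_alt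
  have hflat : lista.foldl (fun acc e => acc ++ [PySem.List.pyGetD e 1 "", PySem.List.pyGetD e 2 ""]) ["0"]
      = "0" :: lista.flatMap (fun e => [PySem.List.pyGetD e 1 "", PySem.List.pyGetD e 2 ""]) := by
    rw [PySem.List.foldl_append_eq_flatMap]; rfl
  set ys := lista.flatMap (fun e => [PySem.List.pyGetD e 1 "", PySem.List.pyGetD e 2 ""]) with hys
  have hdedup : PySem.List.dedup ("0" :: ys) = PySem.Set.update ["0"] ys := by
    rw [PySem.List.dedup_eq_ofList, PySem.Set.ofList_eq_foldl]
    rfl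
  have h0 : ((0 : Int), PySem.Dict.ofList [("0", (0:Int))])
      = (((["0"] : List String).length : Int) - 1, dictOf ["0"]) := by decide
  dsimp only
  rw [foldl_pairs, ← hys, h0, conta_invariant ys ["0"] (by decide), hflat]
  simp only [PySem.List.len_eq]
  rw [sorted_keys_eq_dedup ("0" :: ys), hdedup]
  have hnd : (PySem.Set.update ["0"] ys).Nodup := PySem.Set.nodup_update ["0"] ys (by decide)
  rw [nos_alt_items _ hnd]
  simp [dictOf]
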